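-- pv_equiv track=rewrite | github.com/TheBrokenWay/tso-validation-results | PX_Warehouse/Operations/scripts/fetch_zinc_csv.py | _build_zinc_2d_urls
-- ===== SOURCE A (Python) =====
-- BASE_2D = "https://files.docking.org/2D"
--
-- FIRST_LETTERS = "ABCDEFGHIJK"
--
-- SECOND_LETTERS = "ABCDEFGHIJK"
--
-- REACTIVITY = "ABCDEF"   # anodyne..annotated
--
-- PURCHASABILITY = "AB"   # in stock (A/B) for repurposing-friendly set; expand to "ABCDEF" for more
--
-- def _build_zinc_2d_urls(max_urls: int = 400) -> list[str]:
--     urls: list[str] = []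
--     for c1 in FIRST_LETTERS:
--         for c2 in SECOND_LETTERS:
--             t2 = c1 + c2
--             for r in REACTIVITY:
--                 for p in PURCHASABILITY:
--                     if len(urls) >= max_urls:
--                         return urls
--                     four = t2 + r + p
--                     urls.append(f"{BASE_2D}/{t2}/{four}.smi")
--     return urls
-- ===== SOURCE B (Python) =====
-- BASE_2D = "https://files.docking.org/2D"
--
-- FIRST_LETTERS = "ABCDEFGHIJK"
--
-- SECOND_LETTERS = "ABCDEFGHIJK"
--
-- REACTIVITY = "ABCDEF"
--
-- PURCHASABILITY = "AB"
--
--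
-- def _decode(i: int) -> str:
--     p = PURCHASABILITY[i % 2]
--     r = REACTIVITY[(i // 2) % 6]
--     c2 = SECOND_LETTERS[(i // 12) % 11]
--     c1 = FIRST_LETTERS[i // 132]
--     t2 = c1 + c2
--     return f"{BASE_2D}/{t2}/{t2 + r + p}.smi"
--
--
-- def _build_zinc_2d_urls(max_urls: int = 400) -> list[str]:
--     total = 11 * 11 * 6 * 2
--     count = max(0, min(max_urls, total))
--     return [_decode(i) for i in range(count)]
-- ===== Notes on version B (the rewrite author's own statement) =====
-- stated objective: alternative
-- what changed: Replaces the four nested stateful loops with an early-return cap by a closed-form clamp of the count plus a mixed-radix decode that maps each index i in range(count) directly to its (letter,letter,reactivity,purchasability) tuple.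
import Mathlib
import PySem

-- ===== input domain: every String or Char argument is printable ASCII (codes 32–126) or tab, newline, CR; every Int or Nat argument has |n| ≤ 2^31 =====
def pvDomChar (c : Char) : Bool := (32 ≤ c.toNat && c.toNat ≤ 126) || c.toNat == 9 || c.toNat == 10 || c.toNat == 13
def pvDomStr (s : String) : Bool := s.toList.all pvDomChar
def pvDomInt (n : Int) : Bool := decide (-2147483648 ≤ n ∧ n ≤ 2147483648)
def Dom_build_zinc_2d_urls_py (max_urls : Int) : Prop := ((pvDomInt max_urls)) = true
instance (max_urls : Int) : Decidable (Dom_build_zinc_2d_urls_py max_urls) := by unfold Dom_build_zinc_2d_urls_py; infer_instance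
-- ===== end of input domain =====

-- B replaces A's nested loops with an early-return cap by a clamped count and a
-- mixed-radix index decode (alternative decomposition, same cost).


-- shared module constants (strings as their character lists; ports build each URL
-- as String.ofList of the concatenated characters — exact for Python's str +)
def pvBASE : List Char := "https://files.docking.org/2D".toList
def pvFIRST : List Char := "ABCDEFGHIJK".toList
def pvSECOND : List Char := "ABCDEFGHIJK".toList
def pvREACT : List Char := "ABCDEF".toList
def pvPURCH : List Char := "AB".toList

-- ===== PORT A =====
-- the loop body: early return modelled by the Bool 'stopped' flag threaded with urls
def pvStepA (max_urls : Int) (st : List String × Bool) (u : String) : List String × Bool :=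
  if st.2 then st
  else if max_urls ≤ (st.1.length : Int) then (st.1, true)
  else (st.1 ++ [u], false)

def build_zinc_2d_urls_py (max_urls : Int) : List String :=
  (pvFIRST.foldl (fun st c1 =>
    pvSECOND.foldl (fun st c2 =>
      let t2 := [c1, c2]
      pvREACT.foldl (fun st r =>
        pvPURCH.foldl (fun st p =>
          let four := t2 ++ [r, p]
          pvStepA max_urls st (String.ofList (pvBASE ++ '/' :: t2 ++ '/' :: four ++ ".smi".toList)))
        st) st) st) (([] : List String), false)).1

-- ===== PORT B =====
def pvDecode (i : Nat) : String :=
  let p := pvPURCH.getD (i % 2) 'A'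
  let r := pvREACT.getD (i / 2 % 6) 'A'
  let c2 := pvSECOND.getD (i / 12 % 11) 'A'
  let c1 := pvFIRST.getD (i / 132) 'A'
  let t2 := [c1, c2]
  String.ofList (pvBASE ++ '/' :: t2 ++ '/' :: (t2 ++ [r, p]) ++ ".smi".toList)

def build_zinc_2d_urls_py_alt (max_urls : Int) : List String :=
  let total : Int := 11 * 11 * 6 * 2
  let count : Int := max 0 (min max_urls total)
  (List.range count.toNat).map pvDecode

-- ===== PRECONDITION & SPEC =====
def Spec_build_zinc_2d_urls_py (max_urls : Int) (out : List String) : Prop := out = build_zinc_2d_urls_py_alt max_urls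
instance (max_urls : Int) (out : List String) : Decidable (Spec_build_zinc_2d_urls_py max_urls out) := by unfold Spec_build_zinc_2d_urls_py; infer_instance

-- ===== CLAIM (what is proved, stated in full; the proofs are below) =====
def Claim_equal_build_zinc_2d_urls_py : Prop := ∀ (max_urls : Int), Dom_build_zinc_2d_urls_py max_urls → Spec_build_zinc_2d_urls_py max_urls (build_zinc_2d_urls_py max_urls)

-- ===== LEMMAS AND PROOFS =====

-- the full 1452-element product list, in A's enumeration order
def pvFull : List String :=
  pvFIRST.flatMap (fun c1 =>
    pvSECOND.flatMap (fun c2 =>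
      let t2 := [c1, c2]
      pvREACT.flatMap (fun r =>
        pvPURCH.map (fun p =>
          let four := t2 ++ [r, p]
          String.ofList (pvBASE ++ '/' :: t2 ++ '/' :: four ++ ".smi".toList)))))

-- range (m*n) as a two-digit mixed-radix enumeration
lemma pv_range_mul (m n : Nat) :
    List.range (m * n) = (List.range m).flatMap (fun j => (List.range n).map (fun k => j * n + k)) := by
  induction m with
  | zero => simp
  | succ m ih =>
    rw [Nat.succ_mul, List.range_add, ih, List.range_succ, List.flatMap_append]
    simp

-- flatMap over a concrete list as flatMap over its index range
lemma pv_flatMap_getD {α β : Type} (l : List α) (d : α) (f : α → List β) :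
    l.flatMap f = (List.range l.length).flatMap (fun j => f (l.getD j d)) := by
  induction l with
  | nil => simp
  | cons x xs ih =>
    rw [List.flatMap_cons, List.length_cons, List.range_succ_eq_map, List.flatMap_cons,
      List.flatMap_map, ih]
    simp

lemma pv_map_getD {α β : Type} (l : List α) (d : α) (f : α → β) :
    l.map f = (List.range l.length).map (fun j => f (l.getD j d)) := by
  induction l with
  | nil => simp
  | cons x xs ih =>
    rw [List.map_cons, List.length_cons, List.range_succ_eq_map, List.map_cons, List.map_map, ih]
    simp [Function.comp_def]

-- the key correspondence: B's decode over range 1452 is exactly A's product list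
lemma pv_range_1452 :
    List.range 1452 = (List.range 11).flatMap (fun a => (List.range 11).flatMap (fun b =>
      (List.range 6).flatMap (fun c => (List.range 2).map (fun d => ((a * 11 + b) * 6 + c) * 2 + d)))) := by
  rw [show (1452 : Nat) = 11 * 132 from rfl, pv_range_mul]
  refine List.flatMap_congr fun a ha => ?_
  rw [show (132 : Nat) = 11 * 12 from rfl, pv_range_mul, List.map_flatMap]
  refine List.flatMap_congr fun b hb => ?_
  rw [List.map_map, show (12 : Nat) = 6 * 2 from rfl, pv_range_mul, List.map_flatMap]
  refine List.flatMap_congr fun c hc => ?_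
  rw [List.map_map]
  refine List.map_congr_left fun d hd => ?_
  simp only [Function.comp_def]
  ring

lemma pv_key : (List.range 1452).map pvDecode = pvFull := by
  rw [pvFull]
  simp only [pv_flatMap_getD pvFIRST 'A', pv_flatMap_getD pvSECOND 'A',
    pv_flatMap_getD pvREACT 'A', pv_map_getD pvPURCH 'A',
    show pvFIRST.length = 11 from rfl, show pvSECOND.length = 11 from rfl,
    show pvREACT.length = 6 from rfl, show pvPURCH.length = 2 from rfl]
  rw [pv_range_1452]
  simp only [List.map_flatMap, List.map_map]
  refine List.flatMap_congr fun a ha => ?_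
  refine List.flatMap_congr fun b hb => ?_
  refine List.flatMap_congr fun c hc => ?_
  refine List.map_congr_left fun d hd => ?_
  rw [List.mem_range] at ha hb hc hd
  simp only [Function.comp_def, pvDecode]
  have e1 : (((a * 11 + b) * 6 + c) * 2 + d) % 2 = d := by omega
  have e2 : (((a * 11 + b) * 6 + c) * 2 + d) / 2 % 6 = c := by omega
  have e3 : (((a * 11 + b) * 6 + c) * 2 + d) / 12 % 11 = b := by omega
  have e4 : (((a * 11 + b) * 6 + c) * 2 + d) / 132 = a := by omega
  rw [e1, e2, e3, e4]

-- once stopped, the fold leaves the state unchanged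
lemma pv_foldl_step_true (m : Int) (xs : List String) (acc : List String) :
    List.foldl (pvStepA m) (acc, true) xs = (acc, true) := by
  induction xs with
  | nil => rfl
  | cons u rest ih => simpa [pvStepA] using ih

-- the capped-append fold appends exactly a prefix and records whether it hit the cap
lemma pv_foldl_step (m : Int) (xs : List String) (acc : List String) :
    List.foldl (pvStepA m) (acc, false) xs =
      (acc ++ xs.take (m - acc.length).toNat, decide ((m - acc.length).toNat < xs.length)) := by
  induction xs generalizing acc with
  | nil => simp
  | cons u rest ih =>
    rw [List.foldl_cons]
    by_cases h : m ≤ (acc.length : Int)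
    · have hz : (m - acc.length).toNat = 0 := by omega
      simp [pvStepA, h, hz, pv_foldl_step_true]
    · have hpos : 0 < (m - acc.length).toNat := by omega
      have hstep : pvStepA m (acc, false) u = (acc ++ [u], false) := by
        simp [pvStepA, h]
      rw [hstep, ih, Prod.mk.injEq]
      have ht : (m - (acc.length : Int)).toNat = (m - (((acc ++ [u]).length : Nat) : Int)).toNat + 1 := by
        simp only [List.length_append, List.length_cons, List.length_nil]
        omega
      refine ⟨?_, ?_⟩
      · rw [ht, List.take_succ_cons]
        simp
      · simp only [List.length_append, List.length_cons] at ht ⊢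
        rw [decide_eq_decide, ht]
        omega

-- A computes the first max_urls.toNat elements of the product list
lemma pv_A_foldl (m : Int) :
    build_zinc_2d_urls_py m = (List.foldl (pvStepA m) (([] : List String), false) pvFull).1 := by
  rw [build_zinc_2d_urls_py, pvFull]
  simp only [List.foldl_flatMap, List.foldl_map]

lemma pv_A_eq_take (m : Int) : build_zinc_2d_urls_py m = pvFull.take m.toNat := by
  rw [pv_A_foldl, pv_foldl_step]
  simp

lemma pv_full_length : pvFull.length = 1452 := by
  rw [← pv_key]; simp

theorem build_zinc_2d_urls_py_spec : Claim_equal_build_zinc_2d_urls_py := by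
  intro m _
  unfold Spec_build_zinc_2d_urls_py
  rw [pv_A_eq_take]
  show pvFull.take m.toNat = (List.range (max 0 (min m (11 * 11 * 6 * 2))).toNat).map pvDecode
  have hn : (max 0 (min m (11 * 11 * 6 * 2))).toNat = min m.toNat 1452 := by omega
  rw [hn]
  have h2 : (List.range (min m.toNat 1452)).map pvDecode = pvFull.take (min m.toNat 1452) := by
    rw [← pv_key, ← List.map_take, List.take_range]
    congr 2
    omega
  rw [h2]
  by_cases h : m.toNat ≤ 1452
  · rw [Nat.min_eq_left h]
  · rw [List.take_of_length_le (by rw [pv_full_length]; omega),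
      List.take_of_length_le (by rw [pv_full_length]; omega)]
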